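-- pv_equiv track=rewrite | github.com/dedeon/network_probe | network_probe/utils/statistics.py | max_consecutive_loss
-- ===== SOURCE A (Python) =====
-- def max_consecutive_loss(statuses: list[str]) -> int:
--     """计算最大连续丢包次数"""
--     max_burst = 0
--     current_burst = 0
--     for s in statuses:
--         if s != 'success':
--             current_burst += 1
--             max_burst = max(max_burst, current_burst)
--         else:
--             current_burst = 0
--     return max_burst
-- ===== SOURCE B (Python) =====
-- def max_consecutive_loss(statuses: list[str]) -> int:
--     """计算最大连续丢包次数"""
--     best = 0
--     i = 0
--     n = len(statuses)
--     while i < n: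
--         if statuses[i] != 'success':
--             j = i
--             while j < n and statuses[j] != 'success':
--                 j += 1
--             best = max(j - i, best)
--             i = j
--         else:
--             i += 1
--     return best
-- ===== Notes on version B (the rewrite author's own statement) =====
-- stated objective: alternative
-- what changed: Replaces the per-element running-counter/running-max state machine with a two-pointer run scan: on hitting a non-success element an inner scan measures the whole maximal run at once, and only whole run lengths are compared against the best.
import Mathlib
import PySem

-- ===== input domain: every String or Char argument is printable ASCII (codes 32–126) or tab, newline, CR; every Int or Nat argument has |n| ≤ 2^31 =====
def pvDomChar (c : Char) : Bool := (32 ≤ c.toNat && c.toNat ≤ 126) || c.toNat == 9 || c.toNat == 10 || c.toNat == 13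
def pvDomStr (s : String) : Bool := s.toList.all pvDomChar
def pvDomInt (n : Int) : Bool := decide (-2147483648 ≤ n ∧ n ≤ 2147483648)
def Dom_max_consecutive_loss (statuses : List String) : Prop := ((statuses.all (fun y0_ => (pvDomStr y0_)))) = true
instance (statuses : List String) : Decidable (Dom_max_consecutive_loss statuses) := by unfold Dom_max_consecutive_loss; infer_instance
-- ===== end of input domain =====

-- B replaces A's per-element running-counter state machine with a two-pointer run scan
-- (measure each maximal non-success run at once); objective: alternative, same O(n) cost.

-- ===== PORT A =====
-- state = (max_burst, current_burst), updated per element exactly as A does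
def max_consecutive_loss (statuses : List String) : Int :=
  (statuses.foldl
    (fun acc s =>
      if s ≠ "success" then (max acc.1 (acc.2 + 1), acc.2 + 1)
      else (acc.1, 0))
    (0, 0)).1

-- ===== PORT B =====
-- inner while loop of Source B: length of the leading non-success run and the rest (j - i, statuses[j:])
def pvCountRun : List String → Int × List String
  | [] => (0, [])
  | s :: t =>
    if s ≠ "success" then
      ((pvCountRun t).1 + 1, (pvCountRun t).2)
    else (0, s :: t)

theorem pvCountRun_len : ∀ l : List String, (pvCountRun l).2.length ≤ l.length := by
  intro l
  induction l with
  | nil => simp [pvCountRun]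
  | cons s t ih =>
    simp only [pvCountRun]
    split
    · exact Nat.le_trans ih (Nat.le_succ _)
    · simp

-- outer while loop of Source B, with accumulator best
def pvScan : Int → List String → Int
  | best, [] => best
  | best, s :: t =>
    if s ≠ "success" then
      pvScan (max (pvCountRun (s :: t)).1 best) (pvCountRun (s :: t)).2
    else pvScan best t
termination_by _ l => l.length
decreasing_by
  · simp only [pvCountRun, if_pos ‹s ≠ "success"›]
    exact Nat.lt_succ_of_le (pvCountRun_len t)
  · simp

def max_consecutive_loss_alt (statuses : List String) : Int :=
  pvScan 0 statuses

-- ===== PRECONDITION & SPEC =====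
def Spec_max_consecutive_loss (statuses : List String) (out : Int) : Prop := out = max_consecutive_loss_alt statuses
instance (statuses : List String) (out : Int) : Decidable (Spec_max_consecutive_loss statuses out) := by unfold Spec_max_consecutive_loss; infer_instance

-- ===== CLAIM (what is proved, stated in full; the proofs are below) =====
def Claim_equal_max_consecutive_loss : Prop := ∀ (statuses : List String), Dom_max_consecutive_loss statuses → Spec_max_consecutive_loss statuses (max_consecutive_loss statuses)

-- ===== LEMMAS AND PROOFS =====

-- pvH c l = the final max_burst when entering l with current burst c and max_burst = c
def pvH : Int → List String → Int
  | c, [] => c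
  | c, s :: t => if s ≠ "success" then pvH (c + 1) t else max c (pvH 0 t)

theorem pvH_ge : ∀ (l : List String) (c : Int), c ≤ pvH c l := by
  intro l
  induction l with
  | nil => intro c; simp [pvH]
  | cons s t ih =>
    intro c
    simp only [pvH]
    split
    · exact le_trans (by omega) (ih (c + 1))
    · exact le_max_left _ _

theorem foldA_eq : ∀ (l : List String) (mb cb : Int), 0 ≤ cb → cb ≤ mb →
    (l.foldl
      (fun acc s =>
        if s ≠ "success" then (max acc.1 (acc.2 + 1), acc.2 + 1)
        else (acc.1, 0))
      (mb, cb)).1 = max mb (pvH cb l) := by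
  intro l
  induction l with
  | nil => intro mb cb h0 h; simp [pvH]; omega
  | cons s t ih =>
    intro mb cb h0 h
    simp only [List.foldl, pvH]
    split
    · rw [ih (max mb (cb + 1)) (cb + 1) (by omega) (le_max_right _ _)]
      have := pvH_ge t (cb + 1)
      omega
    · rw [ih mb 0 le_rfl (by omega)]
      have := pvH_ge t (0 : Int)
      omega

theorem pvH_countRun : ∀ (l : List String) (c : Int), 0 ≤ c →
    pvH c l = max (c + (pvCountRun l).1) (pvH 0 (pvCountRun l).2) := by
  intro l
  induction l with
  | nil => intro c h; simp [pvH, pvCountRun]; omega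
  | cons s t ih =>
    intro c h
    simp only [pvH, pvCountRun]
    split
    · rw [ih (c + 1) (by omega)]
      simp only
      omega
    · simp only [pvH]
      rename_i hs
      rw [if_neg hs]
      have := pvH_ge t (0 : Int)
      omega

theorem pvScan_eq : ∀ (n : Nat) (l : List String), l.length ≤ n → ∀ best : Int, 0 ≤ best →
    pvScan best l = max best (pvH 0 l) := by
  intro n
  induction n with
  | zero =>
    intro l hl best hb
    have : l = [] := List.eq_nil_of_length_eq_zero (Nat.le_zero.mp hl)
    subst this
    simp [pvScan, pvH]; omega
  | succ n ih =>
    intro l hl best hb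
    cases l with
    | nil => simp [pvScan, pvH]; omega
    | cons s t =>
      simp only [pvScan]
      split
      · rename_i hs
        have hrun : pvCountRun (s :: t) = ((pvCountRun t).1 + 1, (pvCountRun t).2) := by
          simp [pvCountRun, hs]
        rw [hrun]
        have hlen : (pvCountRun t).2.length ≤ n := by
          have := pvCountRun_len t
          simp at hl
          omega
        rw [ih _ hlen _ (by have := pvH_ge (pvCountRun t).2 (0:Int); omega)]
        have hH : pvH (0:Int) (s :: t) = max (1 + (pvCountRun t).1) (pvH 0 (pvCountRun t).2) := by
          simp only [pvH, if_pos hs]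
          exact pvH_countRun t 1 (by omega)
        rw [hH]
        omega
      · rw [ih t (by simp at hl; omega) best hb]
        simp only [pvH]
        rename_i hs
        rw [if_neg hs]
        have := pvH_ge t (0:Int)
        omega

-- ===== VERDICT (by name: the statement is the Claim_ definition above) =====
theorem max_consecutive_loss_spec : Claim_equal_max_consecutive_loss := by
  intro statuses _
  unfold Spec_max_consecutive_loss max_consecutive_loss max_consecutive_loss_alt
  rw [foldA_eq statuses 0 0 le_rfl le_rfl, pvScan_eq statuses.length statuses le_rfl 0 le_rfl]
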